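-- pv_equiv track=rewrite | github.com/jusdespommes/advent-of-code-2022 | day-6.py | find_first_unique_packet
-- ===== SOURCE A (Python) =====
-- def find_first_unique_packet(chars_lst, num):
--
--     # define lst length
--     lst_len = len(chars_lst)
--     # set start and end point for chars
--     i = 0
--     j = i + num
--
--     # initiate loop until answer found
--     while j < lst_len:
--         i += 1
--         j += 1
--         check = chars_lst[i:j]
--         # check unique chars
--         if len(set(check)) == num:
--             return j
-- ===== SOURCE B (Python) =====
-- def find_first_unique_packet(chars_lst, num):
--     n = len(chars_lst)
--     if num < 0 or 1 + num > n:
--         return None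
--     counts = {}
--     distinct = 0
--     for c in chars_lst[1:1 + num]:
--         counts[c] = counts.get(c, 0) + 1
--         if counts[c] == 1:
--             distinct += 1
--     i = 1
--     while True:
--         if distinct == num:
--             return i + num
--         if i + num >= n:
--             return None
--         out = chars_lst[i]
--         counts[out] = counts[out] - 1
--         if counts[out] == 0:
--             distinct -= 1
--         inc = chars_lst[i + num]
--         counts[inc] = counts.get(inc, 0) + 1
--         if counts[inc] == 1:
--             distinct += 1
--         i += 1
-- ===== Notes on version B (the rewrite author's own statement) =====
-- stated objective: faster
-- what changed: Replaces A's rebuilding of a slice and a set for every window (O(n*num)) with a single left-to-right sliding window that maintains a per-character count dict and an incremental distinct-character counter (O(n)); B keeps A's behaviour of never testing the window that starts at index 0.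
import Mathlib
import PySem

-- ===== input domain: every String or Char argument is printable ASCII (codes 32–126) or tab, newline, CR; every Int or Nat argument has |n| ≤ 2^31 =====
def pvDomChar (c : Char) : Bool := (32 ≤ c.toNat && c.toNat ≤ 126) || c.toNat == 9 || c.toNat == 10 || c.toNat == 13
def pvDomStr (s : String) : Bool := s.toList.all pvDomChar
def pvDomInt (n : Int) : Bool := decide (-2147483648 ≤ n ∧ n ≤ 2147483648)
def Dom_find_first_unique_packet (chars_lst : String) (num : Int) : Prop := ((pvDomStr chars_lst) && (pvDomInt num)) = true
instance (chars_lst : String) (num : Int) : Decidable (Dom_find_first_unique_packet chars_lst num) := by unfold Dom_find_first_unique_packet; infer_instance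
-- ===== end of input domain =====

-- B replaces A's per-window slice + set construction by a single sliding window with a
-- character-count dict and an incremental distinct counter; like A, the window starting
-- at index 0 is never checked (A's loop increments before testing) and B keeps that.

-- ===== PORT A =====
-- while j < lst_len: i += 1; j += 1; check = chars_lst[i:j]; if len(set(check)) == num: return j
def pvAloop (chars : List Char) (lst_len num i j : Int) : Option Int :=
  if _h : j < lst_len then
    let i' := i + 1
    let j' := j + 1
    let check := PySem.List.slice chars (some i') (some j')
    if ((PySem.Set.ofList check).length : Int) = num then some j'
    else pvAloop chars lst_len num i' j'
  else none
termination_by (lst_len - j).toNat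
decreasing_by omega

def find_first_unique_packet (chars_lst : String) (num : Int) : Option Int :=
  let chars := chars_lst.toList
  let lst_len : Int := chars.length
  pvAloop chars lst_len num 0 num

-- ===== PORT B =====
-- counts[c] = counts.get(c, 0) + 1; if counts[c] == 1: distinct += 1   (the initial-window
-- fold of Source B, and also the 'inc' step of its while loop)
def pvBadd (st : PySem.Dict Char Int × Int) (c : Char) : PySem.Dict Char Int × Int :=
  let cnt := st.1.getD c 0 + 1
  (st.1.insert c cnt, if cnt = 1 then st.2 + 1 else st.2)

-- the while-True loop of Source B; Python reads counts[out] directly (the key is always present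
-- there, since out lies in the current window), so getD with default 0 computes the same value
def pvBloop (chars : List Char) (n num : Int) (counts : PySem.Dict Char Int) (distinct i : Int) : Option Int :=
  if distinct = num then some (i + num)
  else if _h : i + num < n then
    match PySem.List.pyGet? chars i, PySem.List.pyGet? chars (i + num) with
    | some out, some inc =>
      let c1 := counts.getD out 0 - 1
      let counts1 := counts.insert out c1
      let d1 := if c1 = 0 then distinct - 1 else distinct
      let st2 := pvBadd (counts1, d1) inc
      pvBloop chars n num st2.1 st2.2 (i + 1)
    | _, _ => none
  else none
termination_by (n - i - num).toNat
decreasing_by omega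

def find_first_unique_packet_alt (chars_lst : String) (num : Int) : Option Int :=
  let chars := chars_lst.toList
  let n : Int := chars.length
  if num < 0 ∨ 1 + num > n then none
  else
    let st := (PySem.List.slice chars (some 1) (some (1 + num))).foldl pvBadd (PySem.Dict.empty, 0)
    pvBloop chars n num st.1 st.2 1

-- ===== PRECONDITION & SPEC =====
def Spec_find_first_unique_packet (chars_lst : String) (num : Int) (out : Option Int) : Prop := out = find_first_unique_packet_alt chars_lst num
instance (chars_lst : String) (num : Int) (out : Option Int) : Decidable (Spec_find_first_unique_packet chars_lst num out) := by unfold Spec_find_first_unique_packet; infer_instance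

-- ===== CLAIM (what is proved, stated in full; the proofs are below) =====
def Claim_equal_find_first_unique_packet : Prop := ∀ (chars_lst : String) (num : Int), Dom_find_first_unique_packet chars_lst num → Spec_find_first_unique_packet chars_lst num (find_first_unique_packet chars_lst num)

-- ===== LEMMAS AND PROOFS =====

-- A's len(set(check)) is the number of distinct characters of the window
lemma pvSetLen (w : List Char) : (PySem.Set.ofList w).length = w.toFinset.card := by
  have h1 : (PySem.Set.ofList w).toFinset = w.toFinset := by
    ext c; simp [List.mem_toFinset, PySem.Set.mem_ofList]
  rw [← h1, List.toFinset_card_of_nodup (PySem.Set.nodup_ofList w)]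

-- invariant carried by B's (counts, distinct) state over the current window w
def pvGood (counts : PySem.Dict Char Int) (distinct : Int) (w : List Char) : Prop :=
  (∀ c, counts.getD c 0 = (w.count c : Int)) ∧ distinct = (w.toFinset.card : Int)

-- adding one character on the right preserves the invariant
lemma pvGood_add {counts : PySem.Dict Char Int} {d : Int} {w : List Char} (h : pvGood counts d w)
    (c : Char) : pvGood (pvBadd (counts, d) c).1 (pvBadd (counts, d) c).2 (w ++ [c]) := by
  obtain ⟨h1, h2⟩ := h
  constructor
  · intro c'
    by_cases hc : c' = c
    · subst hc
      simp [pvBadd, PySem.Dict.getD_insert_self, h1, List.count_append]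
    · simp [pvBadd, PySem.Dict.getD_insert_of_ne _ _ _ hc, h1, List.count_append,
        Ne.symm hc]
  · simp only [pvBadd, h1, h2]
    have htf : (w ++ [c]).toFinset = insert c w.toFinset := by
      simp [List.toFinset_append]
    by_cases hm : c ∈ w
    · rw [htf, Finset.insert_eq_self.mpr (List.mem_toFinset.mpr hm)]
      have hcnt : w.count c ≠ 0 := by simpa [List.count_eq_zero] using hm
      have hne : ¬ ((w.count c : Int) + 1 = 1) := by omega
      simp [hne]
    · have hcnt : w.count c = 0 := List.count_eq_zero.mpr hm
      rw [htf, Finset.card_insert_of_notMem (by simpa using hm)]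
      simp [hcnt]

-- the initial-window fold of Source B establishes the invariant
lemma pvGood_init (w : List Char) :
    pvGood (w.foldl pvBadd (PySem.Dict.empty, 0)).1 (w.foldl pvBadd (PySem.Dict.empty, 0)).2 w := by
  induction w using List.reverseRecOn with
  | nil =>
    constructor
    · intro c; simp [PySem.Dict.getD, PySem.Dict.get?, PySem.Dict.empty]
    · simp
  | append_singleton w c ih =>
    rw [List.foldl_append]
    simpa using pvGood_add ih c

-- removing the leftmost character preserves the invariant
lemma pvGood_remove {counts : PySem.Dict Char Int} {d : Int} {c : Char} {w : List Char}
    (h : pvGood counts d (c :: w)) :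
    pvGood (counts.insert c (counts.getD c 0 - 1))
      (if counts.getD c 0 - 1 = 0 then d - 1 else d) w := by
  obtain ⟨h1, h2⟩ := h
  have hc : counts.getD c 0 = (w.count c : Int) + 1 := by
    rw [h1]; simp
  constructor
  · intro c'
    by_cases hcc : c' = c
    · subst hcc; simp [PySem.Dict.getD_insert_self, hc]
    · rw [PySem.Dict.getD_insert_of_ne _ _ _ hcc, h1]
      simp [Ne.symm hcc]
  · have htf : (c :: w).toFinset = insert c w.toFinset := by simp
    by_cases hm : c ∈ w
    · have hne : counts.getD c 0 - 1 ≠ 0 := by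
        have : w.count c ≠ 0 := by simpa [List.count_eq_zero] using hm
        omega
      rw [if_neg hne, h2, htf, Finset.insert_eq_self.mpr (List.mem_toFinset.mpr hm)]
    · have hcnt : w.count c = 0 := List.count_eq_zero.mpr hm
      have hz : counts.getD c 0 - 1 = 0 := by omega
      rw [if_pos hz, h2, htf, Finset.card_insert_of_notMem (by simpa using hm)]
      push_cast; ring

-- with a negative num, A's test len(set(check)) == num never fires, so A returns None
lemma pvA_neg (chars : List Char) (num : Int) (hnum : num < 0) :
    ∀ (k : Nat) (i j : Int), ((chars.length : Int) - j).toNat = k →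
      pvAloop chars (chars.length : Int) num i j = none := by
  intro k
  induction k with
  | zero =>
    intro i j hk
    rw [pvAloop]
    have : ¬ (j < (chars.length : Int)) := by omega
    simp [this]
  | succ k ih =>
    intro i j hk
    rw [pvAloop]
    by_cases h : j < (chars.length : Int)
    · have hne : ¬ (((PySem.Set.ofList (PySem.List.slice chars (some (i+1)) (some (j+1)))).length : Int) = num) := by
        have : (0:Int) ≤ ((PySem.Set.ofList (PySem.List.slice chars (some (i+1)) (some (j+1)))).length : Int) := by positivity
        omega
      simp only [h, dite_true, if_neg hne]
      exact ih (i+1) (j+1) (by omega)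
    · simp [h]

-- main correspondence: A's loop, about to test the window starting at i, equals B's loop
-- holding a pvGood state for that window
lemma pvLoops (chars : List Char) (num : Int) (hnum : 0 ≤ num) :
    ∀ (k : Nat) (i : Int), 1 ≤ i → i + num ≤ (chars.length : Int) →
      ((chars.length : Int) - i - num).toNat = k →
      ∀ (counts : PySem.Dict Char Int) (distinct : Int),
        pvGood counts distinct ((chars.drop i.toNat).take num.toNat) →
        pvAloop chars (chars.length : Int) num (i - 1) (i - 1 + num)
          = pvBloop chars (chars.length : Int) num counts distinct i := by
  intro k
  induction k with
  | zero =>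
    intro i hi hin hk counts distinct hg
    have hn : i + num = (chars.length : Int) := by omega
    rw [pvAloop, pvBloop]
    have hlt : i - 1 + num < (chars.length : Int) := by omega
    simp only [hlt, dite_true]
    have e1 : i - 1 + 1 = i := by ring
    have e2 : i - 1 + num + 1 = i + num := by ring
    rw [e1, e2]
    have hsl : PySem.List.slice chars (some i) (some (i + num))
        = (chars.drop i.toNat).take num.toNat := by
      rw [PySem.List.slice_toNat chars (by omega) (by omega)]
      congr 1; omega
    rw [hsl, pvSetLen]
    by_cases hd : distinct = num
    · have : (((chars.drop i.toNat).take num.toNat).toFinset.card : Int) = num := by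
        rw [← hg.2]; exact hd
      simp [this, hd]
    · have : ¬ ((((chars.drop i.toNat).take num.toNat).toFinset.card : Int) = num) := by
        rw [← hg.2]; exact hd
      simp only [this, if_false, hd, if_false]
      have hlt2 : ¬ (i + num < (chars.length : Int)) := by omega
      rw [pvAloop]
      simp [hlt2]
  | succ k ih =>
    intro i hi hin hk counts distinct hg
    rw [pvAloop, pvBloop]
    have hlt : i - 1 + num < (chars.length : Int) := by omega
    simp only [hlt, dite_true]
    have e1 : i - 1 + 1 = i := by ring
    have e2 : i - 1 + num + 1 = i + num := by ring
    rw [e1, e2]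
    have hsl : PySem.List.slice chars (some i) (some (i + num))
        = (chars.drop i.toNat).take num.toNat := by
      rw [PySem.List.slice_toNat chars (by omega) (by omega)]
      congr 1; omega
    rw [hsl, pvSetLen]
    by_cases hd : distinct = num
    · have : (((chars.drop i.toNat).take num.toNat).toFinset.card : Int) = num := by
        rw [← hg.2]; exact hd
      simp [this, hd]
    · have hcard : ¬ ((((chars.drop i.toNat).take num.toNat).toFinset.card : Int) = num) := by
        rw [← hg.2]; exact hd
      simp only [hcard, if_false, hd, if_false]
      have hlt2 : i + num < (chars.length : Int) := by omega
      simp only [hlt2, dite_true]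
      -- num ≥ 1 here: otherwise the window is empty and distinct = 0 = num
      have hm1 : 1 ≤ num := by
        rcases lt_or_ge num 1 with h0 | h0
        · exfalso
          have : num = 0 := by omega
          subst this
          have : distinct = 0 := by simpa using hg.2
          exact hd (by omega)
        · exact h0
      have ha : i.toNat < chars.length := by omega
      have ham : i.toNat + num.toNat < chars.length := by omega
      have hgi : PySem.List.pyGet? chars i = some chars[i.toNat] := by
        rw [PySem.List.pyGet?_of_nonneg chars (by omega)]
        exact List.getElem?_eq_getElem ha
      have hgj : PySem.List.pyGet? chars (i + num) = some chars[i.toNat + num.toNat] := by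
        rw [PySem.List.pyGet?_of_nonneg chars (by omega)]
        have e3 : (i + num).toNat = i.toNat + num.toNat := by omega
        rw [e3]
        exact List.getElem?_eq_getElem ham
      rw [hgi, hgj]
      -- the window at i is out :: tail; the window at i+1 is tail ++ [inc]
      have hw_cons : (chars.drop i.toNat).take num.toNat
          = chars[i.toNat] :: ((chars.drop (i.toNat + 1)).take (num.toNat - 1)) := by
        conv_lhs => rw [show num.toNat = (num.toNat - 1) + 1 from by omega]
        rw [List.drop_eq_getElem_cons ha, List.take_succ_cons]
      have hw_next : (chars.drop (i.toNat + 1)).take num.toNat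
          = ((chars.drop (i.toNat + 1)).take (num.toNat - 1)) ++ [chars[i.toNat + num.toNat]] := by
        conv_lhs => rw [show num.toNat = (num.toNat - 1) + 1 from by omega, List.take_add_one]
        congr 1
        rw [List.getElem?_drop]
        rw [show i.toNat + 1 + (num.toNat - 1) = i.toNat + num.toNat by omega]
        rw [List.getElem?_eq_getElem ham]
        rfl
      rw [hw_cons] at hg
      have hrem := pvGood_remove hg
      have hadd := pvGood_add hrem chars[i.toNat + num.toNat]
      rw [← hw_next] at hadd
      have e4 : (i + 1).toNat = i.toNat + 1 := by omega
      rw [← e4] at hadd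
      have := ih (i + 1) (by omega) (by omega) (by omega) _ _ hadd
      rw [show i + 1 - 1 = i by ring] at this
      exact this

-- ===== VERDICT (by name: the statement is the Claim_ definition above) =====
theorem find_first_unique_packet_spec : Claim_equal_find_first_unique_packet := by
  intro s num _
  unfold Spec_find_first_unique_packet find_first_unique_packet find_first_unique_packet_alt
  simp only []
  by_cases hneg : num < 0
  · rw [if_pos (Or.inl hneg)]
    exact pvA_neg s.toList num hneg _ 0 num rfl
  · by_cases hbig : 1 + num > (s.toList.length : Int)
    · rw [if_pos (Or.inr hbig)]
      rw [pvAloop, dif_neg (show ¬ (num < (s.toList.length : Int)) from by omega)]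
    · rw [if_neg (show ¬ (num < 0 ∨ 1 + num > (s.toList.length : Int)) from by omega)]
      have hsl : PySem.List.slice s.toList (some 1) (some (1 + num))
          = (s.toList.drop (1:Int).toNat).take num.toNat := by
        rw [PySem.List.slice_toNat s.toList (by omega) (by omega)]
        congr 1; omega
      rw [hsl]
      have hg := pvGood_init ((s.toList.drop (1:Int).toNat).take num.toNat)
      have := pvLoops s.toList num (by omega) _ 1 (by omega) (by omega) rfl _ _ hg
      rw [show (1:Int) - 1 = 0 by ring, show (0:Int) + num = num by ring] at this
      exact this
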